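-- pv_equiv track=rewrite | github.com/KevinMichaelCamp/Python-HardWay | Algorithms/Chapter4_Strings/07_Remove_Even_Length_Strings.py | removeEvenLength
-- ===== SOURCE A (Python) =====
-- def removeEvenLength(arr):
--     i = 0
--     while i < len(arr):
--         if len(arr[i]) % 2 == 0:
--             arr.remove(arr[i])
--             i -= 1
--         i += 1
--
--     return arr
-- ===== SOURCE B (Python) =====
-- def removeEvenLength(arr):
--     w = 0
--     for s in arr:
--         if len(s) % 2 != 0:
--             arr[w] = s
--             w += 1
--     del arr[w:]
--     return arr
-- ===== Notes on version B (the rewrite author's own statement) =====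
-- stated objective: faster
-- what changed: Replaced the while-loop with repeated arr.remove (inner linear scan) and index back-stepping by a single forward pass with an in-place write pointer: odd-length strings are compacted to the front and the tail is truncated once.
import Mathlib
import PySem

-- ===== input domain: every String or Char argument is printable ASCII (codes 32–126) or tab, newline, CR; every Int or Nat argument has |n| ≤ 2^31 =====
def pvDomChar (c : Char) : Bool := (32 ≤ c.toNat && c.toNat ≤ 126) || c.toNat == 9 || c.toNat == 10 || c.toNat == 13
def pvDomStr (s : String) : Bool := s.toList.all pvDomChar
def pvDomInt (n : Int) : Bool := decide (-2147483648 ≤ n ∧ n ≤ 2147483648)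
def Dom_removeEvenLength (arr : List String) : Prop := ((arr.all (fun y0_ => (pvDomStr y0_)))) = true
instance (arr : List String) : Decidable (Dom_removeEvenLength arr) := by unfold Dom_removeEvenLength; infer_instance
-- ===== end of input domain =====

-- B replaces A's while-loop with repeated arr.remove (inner linear scan, index back-stepping) by a
-- single forward pass with an in-place write pointer (asymptotically faster). Both Pythons mutate
-- arr in place to the same final content; the theorems are about the return value.

-- ===== PORT A =====
-- while i < len(arr): if len(arr[i]) % 2 == 0: arr.remove(arr[i]); i -= 1; i += 1
-- i starts at 0 and is never negative (the i -= 1 is immediately undone by i += 1), so i : Nat.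
def removeEvenLengthLoop (arr : List String) (i : Nat) : List String :=
  if h : i < arr.length then
    if PySem.Int.mod (PySem.Str.len arr[i]) 2 == 0 then
      match hr : PySem.List.remove? arr arr[i] with
      | some arr' => removeEvenLengthLoop arr' i   -- i -= 1 then i += 1: i unchanged
      | none => arr                                -- unreachable: arr[i] ∈ arr, so remove? succeeds
    else
      removeEvenLengthLoop arr (i + 1)
  else
    arr
termination_by arr.length - i
decreasing_by
  · have hmem : arr[i] ∈ arr := List.getElem_mem h
    rw [PySem.List.remove?_eq_some_erase arr arr[i] hmem] at hr
    have : arr'.length = arr.length - 1 := by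
      cases hr; exact List.length_erase_of_mem hmem
    omega
  · omega

def removeEvenLength (arr : List String) : List String :=
  removeEvenLengthLoop arr 0

-- ===== PORT B =====
-- w = 0; for s in arr: if len(s) % 2 != 0: arr[w] = s; w += 1     (writes stay at or behind the
-- read position, so the loop reads the original elements); del arr[w:]; return arr
def removeEvenLength_alt (arr : List String) : List String :=
  let st := arr.foldl
    (fun (st : List String × Nat) s =>
      if PySem.Int.mod (PySem.Str.len s) 2 != 0 then
        (PySem.List.pySetD st.1 (st.2 : Int) s, st.2 + 1)
      else st)
    (arr, 0)
  st.1.take st.2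

-- ===== PRECONDITION & SPEC =====
def Spec_removeEvenLength (arr : List String) (out : List String) : Prop := out = removeEvenLength_alt arr
instance (arr : List String) (out : List String) : Decidable (Spec_removeEvenLength arr out) := by unfold Spec_removeEvenLength; infer_instance

-- ===== CLAIM (what is proved, stated in full; the proofs are below) =====
def Claim_equal_removeEvenLength : Prop := ∀ (arr : List String), Dom_removeEvenLength arr → Spec_removeEvenLength arr (removeEvenLength arr)

-- ===== LEMMAS AND PROOFS =====

-- the common predicate: "odd length is kept"
def pvKeep (s : String) : Bool := !(PySem.Int.mod (PySem.Str.len s) 2 == 0)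

lemma loopA_eq (arr : List String) (i : Nat)
    (hinv : ∀ j, (hj : j < i) → (hj2 : j < arr.length) → pvKeep arr[j] = true) :
    removeEvenLengthLoop arr i = arr.take i ++ (arr.drop i).filter pvKeep := by
  fun_induction removeEvenLengthLoop arr i with
  | case1 arr i h hc arr' hr ih =>
    have hmem : arr[i] ∈ arr := List.getElem_mem h
    rw [PySem.List.remove?_eq_some_erase arr arr[i] hmem] at hr
    have hk : pvKeep arr[i] = false := by simp only [pvKeep, hc, Bool.not_true]
    have hnotpre : arr[i] ∉ arr.take i := by
      intro hm
      obtain ⟨j, hj, hje⟩ := List.getElem_of_mem hm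
      have hji : j < i := lt_of_lt_of_le hj (by simp [List.length_take])
      have hjl : j < arr.length := lt_of_lt_of_le hj (by simp [List.length_take])
      rw [List.getElem_take] at hje
      have hkj := hinv j hji hjl
      rw [hje, hk] at hkj
      exact Bool.false_ne_true hkj
    have hsplit : arr = arr.take i ++ arr[i] :: arr.drop (i + 1) := by
      rw [List.getElem_cons_drop, List.take_append_drop]
    have harr' : arr' = arr.take i ++ arr.drop (i + 1) := by
      have h1 : arr' = arr.erase arr[i] := (Option.some.inj hr).symm
      rw [h1]
      calc arr.erase arr[i]
          = (arr.take i ++ arr[i] :: arr.drop (i + 1)).erase arr[i] := by rw [← hsplit]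
        _ = arr.take i ++ arr.drop (i + 1) := by
            rw [List.erase_append_right _ hnotpre, List.erase_cons_head]
    have hlen : (arr.take i).length = i := by simp [List.length_take]; omega
    have hpre : arr'.take i = arr.take i := by rw [harr', List.take_left' hlen]
    have hsuf : arr'.drop i = arr.drop (i + 1) := by rw [harr', List.drop_left' hlen]
    rw [ih (by
      intro j hj hj2
      have hje : arr'[j] = (arr.take i ++ arr.drop (i + 1))[j]'(by rw [← harr']; exact hj2) :=
        List.getElem_of_eq harr' hj2
      rw [hje, List.getElem_append_left (by omega), List.getElem_take]
      exact hinv j hj (by omega))]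
    rw [hpre, hsuf]
    congr 1
    conv_rhs => rw [← List.getElem_cons_drop h]
    rw [List.filter_cons, hk]
    simp
  | case2 arr i h hc hr =>
    rw [PySem.List.remove?_eq_none_iff] at hr
    exact absurd (List.getElem_mem h) hr
  | case3 arr i h hc ih =>
    have hcb : (PySem.Int.mod (PySem.Str.len arr[i]) 2 == 0) = false := by
      simpa using hc
    have hk : pvKeep arr[i] = true := by simp only [pvKeep, hcb, Bool.not_false]
    rw [ih (by
      intro j hj hj2
      rcases Nat.lt_or_ge j i with hji | hji
      · exact hinv j hji hj2
      · have : j = i := by omega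
        subst this
        exact hk)]
    have ht : arr.take (i + 1) = arr.take i ++ [arr[i]] := by
      rw [List.take_add_one, List.getElem?_eq_getElem h]
      rfl
    rw [ht, ← List.getElem_cons_drop h, List.filter_cons, hk]
    rw [List.append_assoc]
    rfl
  | case4 arr i h =>
    rw [List.drop_eq_nil_of_le (by omega), List.take_of_length_le (by omega)]
    simp

lemma foldB_eq (l a : List String) (w : Nat) (h : w + l.length ≤ a.length) :
    List.take
      (l.foldl
        (fun (st : List String × Nat) s =>
          if PySem.Int.mod (PySem.Str.len s) 2 != 0 then
            (PySem.List.pySetD st.1 (st.2 : Int) s, st.2 + 1)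
          else st)
        (a, w)).2
      (l.foldl
        (fun (st : List String × Nat) s =>
          if PySem.Int.mod (PySem.Str.len s) 2 != 0 then
            (PySem.List.pySetD st.1 (st.2 : Int) s, st.2 + 1)
          else st)
        (a, w)).1 = a.take w ++ l.filter pvKeep := by
  induction l generalizing a w with
  | nil => simp
  | cons s t ih =>
    simp only [List.foldl_cons, List.filter_cons]
    by_cases hp : (PySem.Int.mod (PySem.Str.len s) 2 != 0) = true
    · rw [if_pos hp]
      have hw : w < a.length := by simp at h; omega
      have hps : PySem.List.pySetD a (w : Int) s = a.set w s := PySem.List.pySetD_natCast a w s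
      rw [ih (PySem.List.pySetD a (w : Int) s) (w + 1)
            (by rw [hps]; simp at h ⊢; omega)]
      have hset : (a.set w s).take (w + 1) = a.take w ++ [s] := by
        rw [List.set_eq_take_append_cons_drop, if_pos hw, List.take_append]
        simp [Nat.min_eq_left (Nat.le_of_lt hw)]
      have hk : pvKeep s = true := by simpa [pvKeep] using hp
      rw [hps, hset, hk]
      simp
    · rw [if_neg hp]
      rw [ih a w (by simp at h ⊢; omega)]
      have hk : pvKeep s = false := by
        simp only [pvKeep]
        simpa using hp
      rw [hk]
      simp

-- ===== VERDICT (by name: the statement is the Claim_ definition above) =====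
theorem removeEvenLength_spec : Claim_equal_removeEvenLength := by
  intro arr _
  show removeEvenLength arr = removeEvenLength_alt arr
  have hA := loopA_eq arr 0 (by omega)
  have hB := foldB_eq arr arr 0 (by omega)
  simp only [List.take_zero, List.nil_append, List.drop_zero] at hA hB
  unfold removeEvenLength removeEvenLength_alt
  rw [hA, ← hB]
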